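-- pv_equiv track=rewrite | github.com/Abbrie/py_training | techcampp.py | nhif
-- ===== SOURCE A (Python) =====
-- def nhif(grosss):
--     for i in grosss:
--         if i <= 5999:
--             nhif=150
--         elif i >=6000 and  i <=7999:
--             nhif=300
--         elif i>=8000 and i<=11999:
--             nhif=400
--         elif i>=12000 and i<=14999:
--             nhif=500
--         elif i>=15000 and i<=19999:
--             nhif=600
--         elif i>=20000 and i<=24999:
--             nhif=750
--         elif i>=25000 and i<=29000:
--             nhif=850
--         elif i>=30000 and i<=34999:
--             nhif=900
--         elif i>=35000 and i<=39999:
--             nhif=950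
--         elif i>=40000 and i<=44999:
--             nhif=1000
--         elif i>=45000 and i<=49999:
--             nhif=1100
--         elif i>=50000 and i<= 59999:
--             nhif=1200
--         elif i>=60000 and i<= 69999:
--             nhif=1300
--         elif i>=70000 and i <= 79999:
--             nhif=1400
--         elif i>= 80000 and i<= 89999:
--             nhif=1500
--         elif i>= 90000 and i<= 99999:
--             nhif=1600
--         else:
--             nhif=1700
--     return nhif
-- ===== SOURCE B (Python) =====
-- NHIF_TIERS = [
--     (6000, 7999, 300), (8000, 11999, 400), (12000, 14999, 500),
--     (15000, 19999, 600), (20000, 24999, 750), (25000, 29000, 850),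
--     (30000, 34999, 900), (35000, 39999, 950), (40000, 44999, 1000),
--     (45000, 49999, 1100), (50000, 59999, 1200), (60000, 69999, 1300),
--     (70000, 79999, 1400), (80000, 89999, 1500), (90000, 99999, 1600),
-- ]
--
-- def nhif(grosss):
--     i = grosss[-1]            # only the last gross determines the tier
--     if i <= 5999:
--         return 150
--     for lo, hi, v in NHIF_TIERS:
--         if lo <= i <= hi:
--             return v
--     return 1700               # gaps (29001-29999) and >= 100000
-- ===== Notes on version B (the rewrite author's own statement) =====
-- stated objective: simpler
-- what changed: B looks at only the last element (grosss[-1]) and resolves its tier by scanning a small (lo,hi,value) table with default 1700, instead of A's loop over the whole list re-running a 17-branch if/elif chain for every element.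
-- outside the precondition, e.g. on nhif([]): A raises NameError, B raises IndexError
import Mathlib
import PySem

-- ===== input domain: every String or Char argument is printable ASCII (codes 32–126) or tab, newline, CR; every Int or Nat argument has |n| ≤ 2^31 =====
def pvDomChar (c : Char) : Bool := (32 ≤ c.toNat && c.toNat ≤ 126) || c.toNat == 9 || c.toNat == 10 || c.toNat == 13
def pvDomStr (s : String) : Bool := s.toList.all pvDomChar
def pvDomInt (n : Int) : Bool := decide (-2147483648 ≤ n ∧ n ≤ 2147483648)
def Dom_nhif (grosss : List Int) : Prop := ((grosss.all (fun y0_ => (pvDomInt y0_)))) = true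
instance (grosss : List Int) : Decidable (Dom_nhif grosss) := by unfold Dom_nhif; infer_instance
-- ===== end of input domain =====

-- B looks only at the last element and scans a (lo,hi,value) table; simpler than A's per-element if/elif chain.
-- Equivalence is about the RETURN value; neither program mutates its argument.

-- ===== PORT A =====
-- the 17-branch if/elif chain applied to one element, literally
def nhifChain (i : Int) : Int :=
  if i ≤ 5999 then 150
  else if 6000 ≤ i ∧ i ≤ 7999 then 300
  else if 8000 ≤ i ∧ i ≤ 11999 then 400
  else if 12000 ≤ i ∧ i ≤ 14999 then 500
  else if 15000 ≤ i ∧ i ≤ 19999 then 600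
  else if 20000 ≤ i ∧ i ≤ 24999 then 750
  else if 25000 ≤ i ∧ i ≤ 29000 then 850
  else if 30000 ≤ i ∧ i ≤ 34999 then 900
  else if 35000 ≤ i ∧ i ≤ 39999 then 950
  else if 40000 ≤ i ∧ i ≤ 44999 then 1000
  else if 45000 ≤ i ∧ i ≤ 49999 then 1100
  else if 50000 ≤ i ∧ i ≤ 59999 then 1200
  else if 60000 ≤ i ∧ i ≤ 69999 then 1300
  else if 70000 ≤ i ∧ i ≤ 79999 then 1400
  else if 80000 ≤ i ∧ i ≤ 89999 then 1500
  else if 90000 ≤ i ∧ i ≤ 99999 then 1600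
  else 1700

-- loop: 'nhif' is (re)assigned on every iteration; 'none' = NameError on the empty list (outside Pre_)
def nhif (grosss : List Int) : Int :=
  (grosss.foldl (fun _ i => some (nhifChain i)) (none : Option Int)).getD 0

-- ===== PORT B =====
def nhifTiers : List (Int × Int × Int) :=
  [(6000, 7999, 300), (8000, 11999, 400), (12000, 14999, 500),
   (15000, 19999, 600), (20000, 24999, 750), (25000, 29000, 850),
   (30000, 34999, 900), (35000, 39999, 950), (40000, 44999, 1000),
   (45000, 49999, 1100), (50000, 59999, 1200), (60000, 69999, 1300),
   (70000, 79999, 1400), (80000, 89999, 1500), (90000, 99999, 1600)]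

-- the 'for lo, hi, v in NHIF_TIERS: if lo <= i <= hi: return v' loop with its default 1700
def nhifScan (tiers : List (Int × Int × Int)) (i : Int) : Int :=
  match tiers with
  | [] => 1700
  | (lo, hi, v) :: rest => if lo ≤ i ∧ i ≤ hi then v else nhifScan rest i

-- grosss[-1]; 'none' = IndexError on the empty list (outside Pre_); then the table scan
def nhif_alt (grosss : List Int) : Int :=
  let i := (PySem.List.pyGet? grosss (-1)).getD 0
  if i ≤ 5999 then 150 else nhifScan nhifTiers i

-- ===== PRECONDITION & SPEC =====
-- A raises NameError on the empty list (nhif never assigned), B raises IndexError there.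
def Pre_nhif (grosss : List Int) : Prop := grosss ≠ []
instance (grosss : List Int) : Decidable (Pre_nhif grosss) := by unfold Pre_nhif; infer_instance
def pvWitness_nhif : List Int := [12500]
def Spec_nhif (grosss : List Int) (out : Int) : Prop := out = nhif_alt grosss
instance (grosss : List Int) (out : Int) : Decidable (Spec_nhif grosss out) := by unfold Spec_nhif; infer_instance

-- ===== CLAIM (what is proved, stated in full; the proofs are below) =====
def Claim_equal_nhif : Prop := ∀ (grosss : List Int), Dom_nhif grosss → Pre_nhif grosss → Spec_nhif grosss (nhif grosss)

-- ===== LEMMAS AND PROOFS =====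

-- the table scan agrees with the if/elif chain on every integer
theorem nhifTiers_eq_chain (i : Int) :
    (if i ≤ 5999 then (150 : Int) else nhifScan nhifTiers i) = nhifChain i := by
  simp only [nhifTiers, nhifScan, nhifChain]

-- A's loop keeps only the last element's tier
theorem nhif_foldl_last (l : List Int) (h : l ≠ []) (acc : Option Int) :
    l.foldl (fun _ i => some (nhifChain i)) acc = some (nhifChain (l.getLast h)) := by
  induction l generalizing acc with
  | nil => exact absurd rfl h
  | cons x xs ih =>
    cases xs with
    | nil => simp [List.foldl]
    | cons y ys =>
      rw [List.foldl_cons, ih (by simp)]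
      congr 1

-- ===== VERDICT (by name: the statement is the Claim_ definition above) =====
theorem nhif_spec : Claim_equal_nhif := by
  intro grosss _ hpre
  unfold Spec_nhif nhif nhif_alt
  rw [nhif_foldl_last grosss hpre, PySem.List.pyGet?_neg_one,
      List.getLast?_eq_getLast_of_ne_nil hpre]
  simp only [Option.getD_some]
  exact (nhifTiers_eq_chain _).symm
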